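-- pv_equiv track=rewrite | github.com/CompNet/Splice | plot_ner_degradation_metrics.py | capitalize_snakecase_text
-- ===== SOURCE A (Python) =====
-- GMETRIC_2_PRETTYNAME = {
--     "node_f1": "$N_{F1}$",
--     "node_precision": "$N_{Pre}$",
--     "node_recall": "$N_{Rec}$",
--     "edge_f1": "$L_{F1}$",
--     "edge_precision": "$L_{Pre}$",
--     "edge_recall": "$L_{Rec}$",
--     "weighted_edge_f1": "$WL_{F1}$",
--     "weighted_edge_precision": "$WL_{Pre}$",
--     "weighted_edge_recall": "$WL_{Rec}$",
-- }
--
-- def capitalize_snakecase_text(text: str) -> str: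
--     if text in GMETRIC_2_PRETTYNAME:
--         return GMETRIC_2_PRETTYNAME[text]
--     if text.startswith("lea_"):
--         return "LEA " + capitalize_snakecase_text(text[4:])
--     if text.startswith("ceaf_"):
--         return "CEAF " + capitalize_snakecase_text(text[5:])
--     if text.startswith("b_cubed_"):
--         return "$B^3$ " + capitalize_snakecase_text(text[8:])
--     if text.startswith("muc_"):
--         return "MUC " + capitalize_snakecase_text(text[4:])
--     splitted = text.split("_")
--     return " ".join([word.capitalize() for word in splitted])
-- ===== SOURCE B (Python) =====
-- GMETRIC_2_PRETTYNAME = {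
--     "node_f1": "$N_{F1}$",
--     "node_precision": "$N_{Pre}$",
--     "node_recall": "$N_{Rec}$",
--     "edge_f1": "$L_{F1}$",
--     "edge_precision": "$L_{Pre}$",
--     "edge_recall": "$L_{Rec}$",
--     "weighted_edge_f1": "$WL_{F1}$",
--     "weighted_edge_precision": "$WL_{Pre}$",
--     "weighted_edge_recall": "$WL_{Rec}$",
-- }
--
-- _PREFIX_LABELS = [("lea_", "LEA "), ("ceaf_", "CEAF "), ("b_cubed_", "$B^3$ "), ("muc_", "MUC ")]
--
-- def capitalize_snakecase_text(text: str) -> str: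
--     prefix = ""
--     while True:
--         if text in GMETRIC_2_PRETTYNAME:
--             return prefix + GMETRIC_2_PRETTYNAME[text]
--         for p, label in _PREFIX_LABELS:
--             if text.startswith(p):
--                 prefix += label
--                 text = text[len(p):]
--                 break
--         else:
--             return prefix + " ".join(w.capitalize() for w in text.split("_"))
-- ===== Notes on version B (the rewrite author's own statement) =====
-- stated objective: alternative
-- what changed: Replaces A's recursive prefix-stripping with an iterative while-loop that keeps a prefix accumulator and scans a single (prefix, label) table instead of a chain of hard-coded if/startswith branches.
import Mathlib
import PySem

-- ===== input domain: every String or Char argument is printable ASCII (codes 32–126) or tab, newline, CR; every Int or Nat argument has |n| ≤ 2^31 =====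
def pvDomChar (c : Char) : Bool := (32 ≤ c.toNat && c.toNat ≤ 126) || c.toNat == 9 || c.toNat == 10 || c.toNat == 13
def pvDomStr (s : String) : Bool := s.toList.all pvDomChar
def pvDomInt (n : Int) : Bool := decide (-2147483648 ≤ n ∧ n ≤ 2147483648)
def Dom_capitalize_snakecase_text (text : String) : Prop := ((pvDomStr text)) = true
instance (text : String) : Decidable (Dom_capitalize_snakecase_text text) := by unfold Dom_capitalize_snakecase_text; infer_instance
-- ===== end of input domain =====

-- B rewrites A's recursion as an iterative loop with a prefix accumulator and a prefix table (alternative decomposition, same cost).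


-- GMETRIC_2_PRETTYNAME: dict with distinct literal keys, as an association list (insertion order)
def pvTable : List (List Char × List Char) :=
  [("node_f1".toList, "$N_{F1}$".toList),
   ("node_precision".toList, "$N_{Pre}$".toList),
   ("node_recall".toList, "$N_{Rec}$".toList),
   ("edge_f1".toList, "$L_{F1}$".toList),
   ("edge_precision".toList, "$L_{Pre}$".toList),
   ("edge_recall".toList, "$L_{Rec}$".toList),
   ("weighted_edge_f1".toList, "$WL_{F1}$".toList),
   ("weighted_edge_precision".toList, "$WL_{Pre}$".toList),
   ("weighted_edge_recall".toList, "$WL_{Rec}$".toList)]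

-- word.capitalize(): first char upper-cased, rest lower-cased (exact on the ASCII domain)
def pvCapWord (w : List Char) : List Char :=
  match w with
  | [] => []
  | c :: rest => PySem.Chars.upperChar c :: PySem.Chars.lower rest

-- ===== PORT A =====
-- A's recursion, with a fuel guard for totality only (fuel = length+1 always suffices:
-- every recursive call strips a nonempty prefix); text[k:] with literal k ≥ 0 is List.drop k.
def pvGoA : Nat → List Char → List Char
  | 0, _ => []
  | n + 1, cs =>
    match pvTable.lookup cs with      -- 'text in GMETRIC_2_PRETTYNAME' + 'GMETRIC_2_PRETTYNAME[text]'
    | some v => v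
    | none =>
      if PySem.Chars.startswith cs "lea_".toList then "LEA ".toList ++ pvGoA n (cs.drop 4)
      else if PySem.Chars.startswith cs "ceaf_".toList then "CEAF ".toList ++ pvGoA n (cs.drop 5)
      else if PySem.Chars.startswith cs "b_cubed_".toList then "$B^3$ ".toList ++ pvGoA n (cs.drop 8)
      else if PySem.Chars.startswith cs "muc_".toList then "MUC ".toList ++ pvGoA n (cs.drop 4)
      else PySem.Chars.join " ".toList ((PySem.Chars.splitOn cs "_".toList).map pvCapWord)

def capitalize_snakecase_text (text : String) : String :=
  String.ofList (pvGoA (text.toList.length + 1) text.toList)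

-- ===== PORT B =====
def pvPrefixes : List (List Char × List Char) :=
  [("lea_".toList, "LEA ".toList), ("ceaf_".toList, "CEAF ".toList),
   ("b_cubed_".toList, "$B^3$ ".toList), ("muc_".toList, "MUC ".toList)]

-- B's 'while True' loop with prefix accumulator; same fuel guard for totality only.
def pvGoB : Nat → List Char → List Char → List Char
  | 0, _, _ => []
  | n + 1, acc, cs =>
    match pvTable.lookup cs with
    | some v => acc ++ v
    | none =>
      match pvPrefixes.find? (fun pl => PySem.Chars.startswith cs pl.1) with
      | some pl => pvGoB n (acc ++ pl.2) (cs.drop pl.1.length)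
      | none => acc ++ PySem.Chars.join " ".toList ((PySem.Chars.splitOn cs "_".toList).map pvCapWord)

def capitalize_snakecase_text_alt (text : String) : String :=
  String.ofList (pvGoB (text.toList.length + 1) [] text.toList)

-- ===== PRECONDITION & SPEC =====
def Spec_capitalize_snakecase_text (text : String) (out : String) : Prop := out = capitalize_snakecase_text_alt text
instance (text : String) (out : String) : Decidable (Spec_capitalize_snakecase_text text out) := by unfold Spec_capitalize_snakecase_text; infer_instance

-- ===== CLAIM (what is proved, stated in full; the proofs are below) =====
def Claim_equal_capitalize_snakecase_text : Prop := ∀ (text : String), Dom_capitalize_snakecase_text text → Spec_capitalize_snakecase_text text (capitalize_snakecase_text text)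

-- ===== LEMMAS AND PROOFS =====

theorem pvGoB_eq_goA (n : Nat) : ∀ (acc cs : List Char), cs.length < n →
    pvGoB n acc cs = acc ++ pvGoA n cs := by
  induction n with
  | zero => intro acc cs h; omega
  | succ m ih =>
    intro acc cs h
    simp only [pvGoA, pvGoB]
    cases pvTable.lookup cs with
    | some v => rfl
    | none =>
      simp only [pvPrefixes, List.find?]
      by_cases h1 : PySem.Chars.startswith cs "lea_".toList
      · have hl : 4 ≤ cs.length := by
          simpa using ((PySem.Chars.startswith_iff cs "lea_".toList).mp h1).length_le
        simp only [h1, show ("lea_".toList.length) = 4 from rfl]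
        rw [ih (acc ++ "LEA ".toList) (cs.drop 4) (by simp; omega)]
        simp
      · by_cases h2 : PySem.Chars.startswith cs "ceaf_".toList
        · have hl : 5 ≤ cs.length := by
            simpa using ((PySem.Chars.startswith_iff cs "ceaf_".toList).mp h2).length_le
          simp only [h2, show PySem.Chars.startswith cs "lea_".toList = false from by simpa using h1,
                     show ("ceaf_".toList.length) = 5 from rfl]
          rw [ih (acc ++ "CEAF ".toList) (cs.drop 5) (by simp; omega)]
          simp
        · by_cases h3 : PySem.Chars.startswith cs "b_cubed_".toList
          · have hl : 8 ≤ cs.length := by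
              simpa using ((PySem.Chars.startswith_iff cs "b_cubed_".toList).mp h3).length_le
            simp only [h3, show PySem.Chars.startswith cs "lea_".toList = false from by simpa using h1,
                       show PySem.Chars.startswith cs "ceaf_".toList = false from by simpa using h2,
                       show ("b_cubed_".toList.length) = 8 from rfl]
            rw [ih (acc ++ "$B^3$ ".toList) (cs.drop 8) (by simp; omega)]
            simp
          · by_cases h4 : PySem.Chars.startswith cs "muc_".toList
            · have hl : 4 ≤ cs.length := by
                simpa using ((PySem.Chars.startswith_iff cs "muc_".toList).mp h4).length_le
              simp only [h4, show PySem.Chars.startswith cs "lea_".toList = false from by simpa using h1,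
                         show PySem.Chars.startswith cs "ceaf_".toList = false from by simpa using h2,
                         show PySem.Chars.startswith cs "b_cubed_".toList = false from by simpa using h3,
                         show ("muc_".toList.length) = 4 from rfl]
              rw [ih (acc ++ "MUC ".toList) (cs.drop 4) (by simp; omega)]
              simp
            · simp only [show PySem.Chars.startswith cs "lea_".toList = false from by simpa using h1,
                         show PySem.Chars.startswith cs "ceaf_".toList = false from by simpa using h2,
                         show PySem.Chars.startswith cs "b_cubed_".toList = false from by simpa using h3,
                         show PySem.Chars.startswith cs "muc_".toList = false from by simpa using h4]
              simp

-- ===== VERDICT (by name: the statement is the Claim_ definition above) =====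
theorem capitalize_snakecase_text_spec : Claim_equal_capitalize_snakecase_text := by
  intro text _
  unfold Spec_capitalize_snakecase_text capitalize_snakecase_text capitalize_snakecase_text_alt
  rw [pvGoB_eq_goA (text.toList.length + 1) [] text.toList (by omega)]
  simp
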